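-- pv_equiv track=rewrite | github.com/gioe/laughtrack | apps/scraper/src/laughtrack/core/entities/event/the_bit_theater.py | is_comedy_relevant
-- ===== SOURCE A (Python) =====
-- from typing import List, Optional
--
-- _COMEDY_CATEGORIES = frozenset(
--     [
--         "stand-up",
--         "short form",
--         "long form",
--         "improv",
--         "sketch",
--         "comedy",
--         "stand up",
--         "open mic",
--         "standup",
--     ]
-- )
--
-- _EXCLUDE_CATEGORIES = frozenset(
--     [
--         "class",
--         "play",
--         "burlesque",
--         "drag",
--         "role playing",
--         "musical",
--         "dance",
--         "workshop",
--         "camp",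
--         "audition",
--     ]
-- )
--
-- def is_comedy_relevant(categories: List[str]) -> bool:
--     """Return True if the event's category tags indicate a comedy show."""
--     if not categories:
--         return False
--
--     lower_cats = [c.lower().strip() for c in categories]
--
--     # Exclude if any exclusion category is present
--     for cat in lower_cats:
--         if cat in _EXCLUDE_CATEGORIES:
--             return False
--
--     # Include if any comedy category matches
--     for cat in lower_cats:
--         if cat in _COMEDY_CATEGORIES:
--             return True
--
--     return False
-- ===== SOURCE B (Python) =====
-- from typing import List
--
-- _COMEDY_CATEGORIES = frozenset(
--     [
--         "stand-up",
--         "short form",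
--         "long form",
--         "improv",
--         "sketch",
--         "comedy",
--         "stand up",
--         "open mic",
--         "standup",
--     ]
-- )
--
-- _EXCLUDE_CATEGORIES = frozenset(
--     [
--         "class",
--         "play",
--         "burlesque",
--         "drag",
--         "role playing",
--         "musical",
--         "dance",
--         "workshop",
--         "camp",
--         "audition",
--     ]
-- )
--
-- def is_comedy_relevant(categories: List[str]) -> bool:
--     """Return True if the event's category tags indicate a comedy show."""
--     excluded = False
--     comedy = False
--     for c in categories:
--         t = c.lower().strip()
--         excluded = excluded or t in _EXCLUDE_CATEGORIES
--         comedy = comedy or t in _COMEDY_CATEGORIES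
--     return comedy and not excluded
-- ===== Notes on version B (the rewrite author's own statement) =====
-- stated objective: simpler
-- what changed: Single fold over the raw categories maintaining two boolean flags (excluded, comedy) and combining them at the end, instead of an empty-list guard, a normalized intermediate list and two separate early-exit membership loops.
import Mathlib
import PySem

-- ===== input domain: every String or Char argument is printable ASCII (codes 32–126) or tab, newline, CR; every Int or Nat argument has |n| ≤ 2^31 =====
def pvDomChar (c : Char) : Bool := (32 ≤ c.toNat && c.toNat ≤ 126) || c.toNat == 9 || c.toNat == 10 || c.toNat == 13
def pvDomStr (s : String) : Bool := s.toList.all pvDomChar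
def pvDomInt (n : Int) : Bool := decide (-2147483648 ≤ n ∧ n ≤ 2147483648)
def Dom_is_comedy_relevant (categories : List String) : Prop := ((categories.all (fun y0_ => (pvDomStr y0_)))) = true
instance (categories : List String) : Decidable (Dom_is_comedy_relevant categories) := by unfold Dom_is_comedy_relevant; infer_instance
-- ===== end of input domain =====

-- B replaces A's empty-list guard, normalized intermediate list and two early-exit loops
-- by one fold maintaining two boolean flags, combined at the end (objective: simpler).

-- ===== PORT A =====
def pvComedyCats : List String :=
  ["stand-up", "short form", "long form", "improv", "sketch", "comedy",
   "stand up", "open mic", "standup"]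

def pvExcludeCats : List String :=
  ["class", "play", "burlesque", "drag", "role playing", "musical",
   "dance", "workshop", "camp", "audition"]

-- first for-loop of A: early-return False on an excluded category
def pvLoopExcl : List String → Bool
  | [] => false
  | cat :: rest => if pvExcludeCats.contains cat then true else pvLoopExcl rest

-- second for-loop of A: early-return True on a comedy category
def pvLoopComedy : List String → Bool
  | [] => false
  | cat :: rest => if pvComedyCats.contains cat then true else pvLoopComedy rest

def is_comedy_relevant (categories : List String) : Bool :=
  if categories = [] then false
  else
    let lower_cats := categories.map (fun c => PySem.Str.strip (PySem.Str.lower c))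
    if pvLoopExcl lower_cats then false
    else pvLoopComedy lower_cats

-- ===== PORT B =====
def is_comedy_relevant_alt (categories : List String) : Bool :=
  let st := categories.foldl
    (fun (acc : Bool × Bool) c =>
      let t := PySem.Str.strip (PySem.Str.lower c)
      (acc.1 || pvExcludeCats.contains t, acc.2 || pvComedyCats.contains t))
    (false, false)
  st.2 && !st.1

-- ===== PRECONDITION & SPEC =====
def Spec_is_comedy_relevant (categories : List String) (out : Bool) : Prop := out = is_comedy_relevant_alt categories
instance (categories : List String) (out : Bool) : Decidable (Spec_is_comedy_relevant categories out) := by unfold Spec_is_comedy_relevant; infer_instance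

-- ===== CLAIM (what is proved, stated in full; the proofs are below) =====
def Claim_equal_is_comedy_relevant : Prop := ∀ (categories : List String), Dom_is_comedy_relevant categories → Spec_is_comedy_relevant categories (is_comedy_relevant categories)

-- ===== LEMMAS AND PROOFS =====

-- one step of B's fold
def pvStep (acc : Bool × Bool) (c : String) : Bool × Bool :=
  let t := PySem.Str.strip (PySem.Str.lower c)
  (acc.1 || pvExcludeCats.contains t, acc.2 || pvComedyCats.contains t)

-- B's fold computes exactly A's two early-exit loops over the normalized list
theorem pvFold_loops (cats : List String) : ∀ (a b : Bool),
    cats.foldl pvStep (a, b)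
      = (a || pvLoopExcl (cats.map fun c => PySem.Str.strip (PySem.Str.lower c)),
         b || pvLoopComedy (cats.map fun c => PySem.Str.strip (PySem.Str.lower c))) := by
  induction cats with
  | nil => intro a b; simp [pvLoopExcl, pvLoopComedy]
  | cons c rest ih =>
    intro a b
    by_cases hE : pvExcludeCats.contains (PySem.Str.strip (PySem.Str.lower c)) <;>
      by_cases hC : pvComedyCats.contains (PySem.Str.strip (PySem.Str.lower c)) <;>
      simp [List.foldl_cons, List.map_cons, pvStep, pvLoopExcl, pvLoopComedy, ih, Bool.or_assoc]

-- ===== VERDICT (by name: the statement is the Claim_ definition above) =====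
theorem is_comedy_relevant_spec : Claim_equal_is_comedy_relevant := by
  intro categories _
  show is_comedy_relevant categories = is_comedy_relevant_alt categories
  have halt : is_comedy_relevant_alt categories
      = ((pvLoopComedy (categories.map fun c => PySem.Str.strip (PySem.Str.lower c)))
         && !(pvLoopExcl (categories.map fun c => PySem.Str.strip (PySem.Str.lower c)))) := by
    show ((categories.foldl pvStep (false, false)).2
        && !(categories.foldl pvStep (false, false)).1)
      = ((pvLoopComedy (categories.map fun c => PySem.Str.strip (PySem.Str.lower c)))
         && !(pvLoopExcl (categories.map fun c => PySem.Str.strip (PySem.Str.lower c))))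
    rw [pvFold_loops]
    simp
  rw [halt]
  cases categories with
  | nil => rfl
  | cons c rest =>
    unfold is_comedy_relevant
    rw [if_neg (List.cons_ne_nil c rest)]
    show (if pvLoopExcl ((c :: rest).map fun x => PySem.Str.strip (PySem.Str.lower x)) = true
          then false
          else pvLoopComedy ((c :: rest).map fun x => PySem.Str.strip (PySem.Str.lower x)))
        = _
    cases hE : pvLoopExcl ((c :: rest).map fun x => PySem.Str.strip (PySem.Str.lower x)) <;>
      cases hC : pvLoopComedy ((c :: rest).map fun x => PySem.Str.strip (PySem.Str.lower x)) <;>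
      simp
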